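-- pv_equiv track=rewrite | github.com/rohan-anand021/agentbench | agentbench/tools/patching.py | _normalize_split_headers
-- ===== SOURCE A (Python) =====
-- def _normalize_split_headers(patch_txt: str) -> tuple[str, bool]:
--     lines = patch_txt.splitlines()
--     out: list[str] = []
--     changed = False
--     i = 0
--
--     while i < len(lines):
--         line = lines[i]
--         stripped = line.strip()
--         if stripped in ("---", "+++"):
--             if i + 1 < len(lines):
--                 next_line = lines[i + 1]
--                 if next_line and not next_line.startswith(("---", "+++", "@@")):
--                     out.append(f"{stripped} {next_line.lstrip()}")
--                     changed = True
--                     i += 2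
--                     continue
--         out.append(line)
--         i += 1
--
--     return "\n".join(out), changed
-- ===== SOURCE B (Python) =====
-- def _normalize_split_headers(patch_txt: str) -> tuple[str, bool]:
--     out: list[str] = []
--     changed = False
--     pending = None  # (original line, stripped form) of a bare ---/+++ header
--     for line in patch_txt.splitlines():
--         if pending is not None:
--             stored, stripped_hdr = pending
--             pending = None
--             if line and not line.startswith(("---", "+++", "@@")):
--                 out.append(f"{stripped_hdr} {line.lstrip()}")
--                 changed = True
--                 continue
--             out.append(stored)
--         stripped = line.strip()
--         if stripped in ("---", "+++"):
--             pending = (line, stripped)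
--         else:
--             out.append(line)
--     if pending is not None:
--         out.append(pending[0])
--     return "\n".join(out), changed
-- ===== Notes on version B (the rewrite author's own statement) =====
-- stated objective: alternative
-- what changed: Replaced A's index-based while loop with lines[i+1] lookahead and i+=2 skipping by a single forward pass that carries the previous bare header (original line and stripped form) as optional state flushed after the loop.
import Mathlib
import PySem

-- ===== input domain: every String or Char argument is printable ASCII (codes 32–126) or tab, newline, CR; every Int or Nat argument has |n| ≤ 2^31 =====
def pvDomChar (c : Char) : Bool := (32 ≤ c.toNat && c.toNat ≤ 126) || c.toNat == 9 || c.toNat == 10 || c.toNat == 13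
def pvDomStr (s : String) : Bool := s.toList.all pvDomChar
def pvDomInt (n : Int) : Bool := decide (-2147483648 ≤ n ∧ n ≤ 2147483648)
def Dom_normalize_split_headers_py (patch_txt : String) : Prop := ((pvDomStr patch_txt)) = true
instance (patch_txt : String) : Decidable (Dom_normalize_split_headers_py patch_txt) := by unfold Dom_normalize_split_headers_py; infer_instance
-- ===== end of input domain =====

-- B replaces A's index-based while loop with lookahead by a single forward pass
-- carrying a carried bare-header state (objective: alternative decomposition, same cost).

-- ===== PORT A =====
-- A's while loop over index i, with lookahead at lines[i+1]; ported as recursion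
-- on the remaining list of lines (i+=2 drops two elements on a merge).
def pvLoopA : List String → List String → Bool → List String × Bool
  | [], out, changed => (out, changed)
  | line :: rest, out, changed =>
    let stripped := PySem.Str.strip line
    if stripped == "---" || stripped == "+++" then
      match rest with
      | next :: rest' =>
        if next ≠ "" ∧ ¬(PySem.Str.startswith next "---" = true ∨
                          PySem.Str.startswith next "+++" = true ∨
                          PySem.Str.startswith next "@@" = true) then
          pvLoopA rest' (out ++ [stripped ++ " " ++ PySem.Str.lstrip next]) true
        else
          pvLoopA (next :: rest') (out ++ [line]) changed
      | [] => (out ++ [line], changed)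
    else
      pvLoopA rest (out ++ [line]) changed
termination_by lines => lines.length
decreasing_by all_goals (simp_all; try omega)

def normalize_split_headers_py (patch_txt : String) : String × Bool :=
  let r := pvLoopA (PySem.Str.splitlines patch_txt) [] false
  (PySem.Str.join "\n" r.1, r.2)

-- ===== PORT B =====
-- B's single forward pass carrying an optional held-back header: (original line, stripped form)
-- of a bare '---'/'+++' header seen on the previous line; flushed after the loop.
def pvLoopB : List String → Option (String × String) → List String → Bool → List String × Bool
  | [], pending, out, changed =>
    match pending with
    | some p => (out ++ [p.1], changed)
    | none => (out, changed)
  | line :: rest, pending, out, changed =>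
    match pending with
    | some (stored, strippedHdr) =>
      if line ≠ "" ∧ ¬(PySem.Str.startswith line "---" = true ∨
                        PySem.Str.startswith line "+++" = true ∨
                        PySem.Str.startswith line "@@" = true) then
        pvLoopB rest none (out ++ [strippedHdr ++ " " ++ PySem.Str.lstrip line]) true
      else
        -- flush the stored header, then examine the current line fresh
        let stripped := PySem.Str.strip line
        if stripped == "---" || stripped == "+++" then
          pvLoopB rest (some (line, stripped)) (out ++ [stored]) changed
        else
          pvLoopB rest none (out ++ [stored] ++ [line]) changed
    | none =>
      let stripped := PySem.Str.strip line
      if stripped == "---" || stripped == "+++" then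
        pvLoopB rest (some (line, stripped)) out changed
      else
        pvLoopB rest none (out ++ [line]) changed

def normalize_split_headers_py_alt (patch_txt : String) : String × Bool :=
  let r := pvLoopB (PySem.Str.splitlines patch_txt) none [] false
  (PySem.Str.join "\n" r.1, r.2)

-- ===== PRECONDITION & SPEC =====
def Spec_normalize_split_headers_py (patch_txt : String) (out : String × Bool) : Prop := out = normalize_split_headers_py_alt patch_txt
instance (patch_txt : String) (out : String × Bool) : Decidable (Spec_normalize_split_headers_py patch_txt out) := by unfold Spec_normalize_split_headers_py; infer_instance

-- ===== CLAIM (what is proved, stated in full; the proofs are below) =====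
def Claim_equal_normalize_split_headers_py : Prop := ∀ (patch_txt : String), Dom_normalize_split_headers_py patch_txt → Spec_normalize_split_headers_py patch_txt (normalize_split_headers_py patch_txt)

-- ===== LEMMAS AND PROOFS =====

-- Invariant: B with no pending state matches A; B carrying a pending header
-- matches A restarted at that header line.
lemma pvLoop_eq (lines : List String) : ∀ (out : List String) (ch : Bool),
    (pvLoopB lines none out ch = pvLoopA lines out ch) ∧
    (∀ line, (PySem.Str.strip line == "---" || PySem.Str.strip line == "+++") = true →
      pvLoopB lines (some (line, PySem.Str.strip line)) out ch = pvLoopA (line :: lines) out ch) := by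
  induction lines with
  | nil =>
    intro out ch
    refine ⟨by simp [pvLoopB, pvLoopA], ?_⟩
    intro line h
    simp [pvLoopB, pvLoopA, h]
  | cons l ls ih =>
    intro out ch
    constructor
    · by_cases hl : (PySem.Str.strip l == "---" || PySem.Str.strip l == "+++") = true
      · calc pvLoopB (l :: ls) none out ch
            = pvLoopB ls (some (l, PySem.Str.strip l)) out ch := by simp [pvLoopB, hl]
          _ = pvLoopA (l :: ls) out ch := (ih out ch).2 l hl
      · calc pvLoopB (l :: ls) none out ch
            = pvLoopB ls none (out ++ [l]) ch := by rw [pvLoopB.eq_def]; simp [hl]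
          _ = pvLoopA ls (out ++ [l]) ch := (ih (out ++ [l]) ch).1
          _ = pvLoopA (l :: ls) out ch := by
              rw [show pvLoopA (l :: ls) out ch = pvLoopA ls (out ++ [l]) ch from by
                rw [pvLoopA.eq_def]; simp [hl]]
    · intro line hline
      by_cases hm : l ≠ "" ∧ ¬(PySem.Str.startswith l "---" = true ∨
                                PySem.Str.startswith l "+++" = true ∨
                                PySem.Str.startswith l "@@" = true)
      · calc pvLoopB (l :: ls) (some (line, PySem.Str.strip line)) out ch
            = pvLoopB ls none (out ++ [PySem.Str.strip line ++ " " ++ PySem.Str.lstrip l]) true := by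
              simp only [pvLoopB]; rw [if_pos hm]
          _ = pvLoopA ls (out ++ [PySem.Str.strip line ++ " " ++ PySem.Str.lstrip l]) true :=
              (ih _ true).1
          _ = pvLoopA (line :: l :: ls) out ch := by
              simp only [pvLoopA, hline, if_true]; rw [if_pos hm]
      · by_cases hl : (PySem.Str.strip l == "---" || PySem.Str.strip l == "+++") = true
        · calc pvLoopB (l :: ls) (some (line, PySem.Str.strip line)) out ch
              = pvLoopB ls (some (l, PySem.Str.strip l)) (out ++ [line]) ch := by
                simp only [pvLoopB]; rw [if_neg hm]; simp [hl]
            _ = pvLoopA (l :: ls) (out ++ [line]) ch := (ih (out ++ [line]) ch).2 l hl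
            _ = pvLoopA (line :: l :: ls) out ch := by
                simp only [pvLoopA, hline, if_true]; rw [if_neg hm]
        · calc pvLoopB (l :: ls) (some (line, PySem.Str.strip line)) out ch
              = pvLoopB ls none (out ++ [line] ++ [l]) ch := by
                simp only [pvLoopB]; rw [if_neg hm]; simp [hl]
            _ = pvLoopA ls (out ++ [line] ++ [l]) ch := (ih _ ch).1
            _ = pvLoopA (l :: ls) (out ++ [line]) ch := by
                rw [show pvLoopA (l :: ls) (out ++ [line]) ch
                    = pvLoopA ls (out ++ [line] ++ [l]) ch from by
                  rw [pvLoopA.eq_def]; simp [hl]]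
            _ = pvLoopA (line :: l :: ls) out ch := by
                simp only [pvLoopA, hline, if_true]; rw [if_neg hm]

-- ===== VERDICT (by name: the statement is the Claim_ definition above) =====
theorem normalize_split_headers_py_spec : Claim_equal_normalize_split_headers_py := by
  intro patch_txt _
  unfold Spec_normalize_split_headers_py normalize_split_headers_py normalize_split_headers_py_alt
  rw [(pvLoop_eq (PySem.Str.splitlines patch_txt) [] false).1]
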